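-- pv_equiv track=rewrite | github.com/Amina7088/40-exercises | 37_CountLuck/Solution.py | countLuck
-- ===== SOURCE A (Python) =====
-- from collections import deque
--
-- def countLuck(matrix, k):
--     n, m = len(matrix), len(matrix[0])
--     directions = [(1,0), (-1,0), (0,1), (0,-1)]
--
--     for i in range(n):
--         for j in range(m):
--             if matrix[i][j] == 'M':
--                 start = (i, j)
--             if matrix[i][j] == '*':
--                 goal = (i, j)
--
--     visited = [[False]*m for _ in range(n)]
--     queue = deque()
--     queue.append((start[0], start[1], 0))  # x, y, fork_count
--     visited[start[0]][start[1]] = True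
--
--     while queue:
--         x, y, forks = queue.popleft()
--         if (x, y) == goal:
--             return "Impressed" if forks == k else "Oops!"
--
--         neighbors = []
--         for dx, dy in directions:
--             nx, ny = x+dx, y+dy
--             if 0 <= nx < n and 0 <= ny < m:
--                 if not visited[nx][ny] and matrix[nx][ny] != 'X':
--                     neighbors.append((nx, ny))
--
--         if len(neighbors) > 1:
--             forks += 1
--
--         for nx, ny in neighbors:
--             visited[nx][ny] = True
--             queue.append((nx, ny, forks))
-- ===== SOURCE B (Python) =====
-- def countLuck(matrix, k):
--     n, m = len(matrix), len(matrix[0])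
--
--     # one flat cell list with its characters; markers by reversed first-match (= last occurrence)
--     cells = [((i, j), ch) for i, row in enumerate(matrix) for j, ch in enumerate(row[:m])]
--     start = next(c for c, ch in reversed(cells) if ch == 'M')
--     goal = next(c for c, ch in reversed(cells) if ch == '*')
--
--     # walkable cells as one set: the neighbour test needs no bound arithmetic
--     free = {c for c, ch in cells if ch != 'X'}
--
--     # BFS recording a parent pointer and a fork flag per cell; on reaching the goal
--     # the fork count is reconstructed along the tree path back to the start
--     parent, flag = {}, {}
--     seen = {start}
--     queue = [start]
--     qi = 0
--     while qi < len(queue):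
--         cur = queue[qi]
--         qi += 1
--         if cur == goal:
--             forks, c = 0, goal
--             while c != start:
--                 c = parent[c]
--                 forks += flag[c]
--             return "Impressed" if forks == k else "Oops!"
--         x, y = cur
--         nbrs = [nb for nb in ((x + 1, y), (x - 1, y), (x, y + 1), (x, y - 1))
--                 if nb in free and nb not in seen]
--         flag[cur] = 1 if len(nbrs) > 1 else 0
--         for nb in nbrs:
--             seen.add(nb)
--             parent[nb] = cur
--             queue.append(nb)
--     return "Oops!"
-- ===== Notes on version B (the rewrite author's own statement) =====
-- stated objective: alternative
-- what changed: A scans with a nested index loop, keeps a 2-D visited matrix and carries a fork counter inside every BFS queue entry; B flattens the grid once into a cell list, derives the markers by a reversed first-match search and a set of walkable cells (so the neighbour test is one set membership with no bound arithmetic), runs the BFS recording only a parent pointer and a per-cell fork flag, and reconstructs the answer by walking the parent chain from the goal back to the start.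
-- outside the precondition, e.g. on countLuck(['MX*'], 0): A returns None, B returns 'Oops!'
import Mathlib
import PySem

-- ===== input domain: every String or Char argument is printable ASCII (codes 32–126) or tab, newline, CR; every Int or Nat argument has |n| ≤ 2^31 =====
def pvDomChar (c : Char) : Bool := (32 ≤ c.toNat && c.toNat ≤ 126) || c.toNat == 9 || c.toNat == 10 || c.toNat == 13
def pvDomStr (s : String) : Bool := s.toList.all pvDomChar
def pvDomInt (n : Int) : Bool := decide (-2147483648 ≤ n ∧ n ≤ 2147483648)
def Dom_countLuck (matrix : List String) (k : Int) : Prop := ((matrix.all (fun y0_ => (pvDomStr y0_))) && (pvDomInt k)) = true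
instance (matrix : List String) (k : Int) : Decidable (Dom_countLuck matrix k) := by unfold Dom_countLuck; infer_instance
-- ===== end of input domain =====

-- B replaces A's nested index scan / 2-D visited matrix / queue-carried fork counters by one flat
-- cell list, a set of walkable cells, and a BFS that records a parent and a fork flag per cell and
-- reconstructs the fork count along the tree path from the goal back to the start
-- (objective: alternative decomposition, same asymptotic cost).

-- ===== PORT A =====
-- grid accessor: matrix[i][j]; exact for 0 ≤ i < len(matrix), 0 ≤ j < len(matrix[i]) — every use
-- is behind exactly these bound checks (rows shorter than row 0 make Python raise IndexError and
-- are excluded by Pre_).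
def pvCellD (matrix : List String) (i j : Int) : Char :=
  ((matrix.getD i.toNat "").toList).getD j.toNat ' '

def pvDirs : List (Int × Int) := [(1,0),(-1,0),(0,1),(0,-1)]

-- visited[x][y] lookup / visited[x][y] = True (used under 0 ≤ x, 0 ≤ y bound checks only)
def pvGetV (v : List (List Bool)) (x y : Int) : Bool := (v.getD x.toNat []).getD y.toNat false
def pvSetV (v : List (List Bool)) (x y : Int) : List (List Bool) :=
  v.set x.toNat ((v.getD x.toNat []).set y.toNat true)

-- the double scanning loop: for i in range(n): for j in range(m): … (last occurrence wins)
def pvScanA (matrix : List String) (n' m' : Nat) : Option (Int × Int) × Option (Int × Int) :=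
  (List.range n').foldl (fun acc (i : Nat) => (List.range m').foldl (fun acc (j : Nat) =>
     let c := pvCellD matrix (i : Int) (j : Int)
     let acc1 := if c = 'M' then (some ((i : Int), (j : Int)), acc.2) else acc
     if c = '*' then (acc1.1, some ((i : Int), (j : Int))) else acc1) acc) (none, none)

-- the neighbour loop: for dx,dy in directions: … neighbors.append(...)
def pvNbrsA (matrix : List String) (n m : Int) (visited : List (List Bool)) (x y : Int) :
    List (Int × Int) :=
  pvDirs.foldl (fun acc d =>
    let nx := x + d.1
    let ny := y + d.2
    if 0 ≤ nx ∧ nx < n ∧ 0 ≤ ny ∧ ny < m then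
      if pvGetV visited nx ny = false ∧ pvCellD matrix nx ny ≠ 'X' then acc ++ [(nx, ny)]
      else acc
    else acc) []

-- the BFS while-loop; fuel n·m+1 bounds the number of pops (each enqueue marks a fresh cell,
-- so there are at most n·m pops) and is never exhausted.  On an empty queue Python A falls
-- through and returns None — that lies outside Pre_; the port returns "Oops!" there (the value
-- is irrelevant inside Pre_).
def pvLoopA (matrix : List String) (k : Int) (n m : Int) (goal : Int × Int) :
    Nat → List (Int × Int × Int) → List (List Bool) → String
  | 0, _, _ => "Oops!"
  | _+1, [], _ => "Oops!"
  | fuel+1, (x, y, forks) :: rest, visited =>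
      if (x, y) = goal then (if forks = k then "Impressed" else "Oops!")
      else
        let nbrs := pvNbrsA matrix n m visited x y
        let forks := if 1 < nbrs.length then forks + 1 else forks
        let st := nbrs.foldl
          (fun (st : List (Int × Int × Int) × List (List Bool)) c =>
            (st.1 ++ [(c.1, c.2, forks)], pvSetV st.2 c.1 c.2)) (rest, visited)
        pvLoopA matrix k n m goal fuel st.1 st.2

def countLuck (matrix : List String) (k : Int) : String :=
  let n' := matrix.length
  let m' := (matrix.headD "").length      -- len(matrix[0]); on [] Python raises (outside Pre_)
  match pvScanA matrix n' m' with
  | (some start, some goal) =>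
      let visited0 := List.replicate n' (List.replicate m' false)
      pvLoopA matrix k (n' : Int) (m' : Int) goal (n' * m' + 1)
        [(start.1, start.2, 0)] (pvSetV visited0 start.1 start.2)
  | _ => ""                                -- NameError (start/goal unbound); outside Pre_

-- ===== PORT B =====
-- cells = [((i, j), ch) for i, row in enumerate(matrix) for j, ch in enumerate(row[:m])]
-- (row[:m] with 0 ≤ m is .take m — PySem.List.slice_to_natCast)
def pvCellsB (matrix : List String) (m' : Nat) : List ((Int × Int) × Char) :=
  (PySem.List.enumerate matrix 0).flatMap (fun r =>
    (PySem.List.enumerate (r.2.toList.take m') 0).map (fun c => ((r.1, c.1), c.2)))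

-- free = {c for c, ch in cells if ch != 'X'}
def pvFreeB (cells : List ((Int × Int) × Char)) : PySem.Set (Int × Int) :=
  PySem.Set.ofList (cells.filterMap (fun p => if p.2 ≠ 'X' then some p.1 else none))

-- nbrs = [nb for nb in ((x+1,y),(x-1,y),(x,y+1),(x,y-1)) if nb in free and nb not in seen]
def pvStepB (free seen : PySem.Set (Int × Int)) (x y : Int) : List (Int × Int) :=
  [(x + 1, y), (x - 1, y), (x, y + 1), (x, y - 1)].filter
    (fun nb => PySem.Set.contains free nb && !PySem.Set.contains seen nb)

-- while c != start: c = parent[c]; forks += flag[c]  — fuel bw exceeds the length of any parent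
-- chain; the none branch is Python's KeyError, unreachable for a goal the BFS found.
def pvWalkBack (parent : PySem.Dict (Int × Int) (Int × Int)) (flag : PySem.Dict (Int × Int) Int)
    (start : Int × Int) : Nat → (Int × Int) → Int → Int
  | 0, _, acc => acc
  | f+1, c, acc =>
      if c = start then acc
      else match parent.get? c with
           | some p => pvWalkBack parent flag start f p (acc + flag.getD p 0)
           | none => acc

-- the BFS while-loop of Source B (the index pointer qi into the growing queue list is ported as head
-- consumption of the same FIFO: the same cells are processed in the same order); fuel as in
-- pvLoopA, never exhausted (exhaustion = loop ended without reaching the goal).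
def pvLoopB (goal start : Int × Int) (k : Int) (free : PySem.Set (Int × Int)) (bw : Nat) :
    Nat → List (Int × Int) → PySem.Set (Int × Int) →
    PySem.Dict (Int × Int) (Int × Int) → PySem.Dict (Int × Int) Int → String
  | 0, _, _, _, _ => "Oops!"
  | _+1, [], _, _, _ => "Oops!"
  | fuel+1, cur :: rest, seen, parent, flag =>
      if cur = goal then
        (if pvWalkBack parent flag start bw goal 0 = k then "Impressed" else "Oops!")
      else
        let nbrs := pvStepB free seen cur.1 cur.2
        let flag' := flag.insert cur (if 1 < nbrs.length then 1 else 0)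
        let st := nbrs.foldl
          (fun (st : List (Int × Int) × PySem.Set (Int × Int) ×
                PySem.Dict (Int × Int) (Int × Int)) nb =>
            (st.1 ++ [nb], PySem.Set.add st.2.1 nb, st.2.2.insert nb cur)) (rest, seen, parent)
        pvLoopB goal start k free bw fuel st.1 st.2.1 st.2.2 flag'

def countLuck_alt (matrix : List String) (k : Int) : String :=
  let m' := (matrix.headD "").length
  let cells := pvCellsB matrix m'
  match cells.reverse.find? (fun p => p.2 = 'M') with
  | none => ""                             -- next() raises StopIteration; outside Pre_
  | some s =>
    match cells.reverse.find? (fun p => p.2 = '*') with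
    | none => ""                           -- next() raises StopIteration; outside Pre_
    | some g =>
        let bw := matrix.length * m' + 1
        pvLoopB g.1 s.1 k (pvFreeB cells) bw bw
          [s.1] (PySem.Set.ofList [s.1]) PySem.Dict.empty PySem.Dict.empty

-- ===== PRECONDITION & SPEC =====
-- Pre_ helpers (defined independently of both ports): the grid accessor, the cell list,
-- the position of the last 'M' / last '*', and the neighbour closure of the start cell,
-- i.e. connectivity through non-'X' cells.
def pvCellDP (matrix : List String) (i j : Int) : Char :=
  ((matrix.getD i.toNat "").toList).getD j.toNat ' '
def pvCellsListP (n' m' : Nat) : List (Int × Int) :=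
  (List.range n').flatMap (fun i : Nat => (List.range m').map (fun j : Nat => ((i : Int), (j : Int))))
def pvStartOf (matrix : List String) : Option (Int × Int) :=
  (pvCellsListP matrix.length (matrix.headD "").length).reverse.find?
    (fun c => pvCellDP matrix c.1 c.2 = 'M')
def pvGoalOf (matrix : List String) : Option (Int × Int) :=
  (pvCellsListP matrix.length (matrix.headD "").length).reverse.find?
    (fun c => pvCellDP matrix c.1 c.2 = '*')
def pvStepClo (matrix : List String) (S : List (Int × Int)) : List (Int × Int) :=
  PySem.Set.update S (S.flatMap (fun c => [((1:Int),(0:Int)), (-1,0), (0,1), (0,-1)].filterMap (fun d =>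
    let nx := c.1 + d.1
    let ny := c.2 + d.2
    if 0 ≤ nx ∧ nx < (matrix.length : Int) ∧ 0 ≤ ny ∧ ny < ((matrix.headD "").length : Int) ∧
        pvCellDP matrix nx ny ≠ 'X'
    then some (nx, ny) else none)))

-- Pre_ excludes exactly the inputs where Python A does not return a string: ragged rows (a row
-- shorter than row 0: IndexError), a grid without an 'M' or without a '*' (NameError), and a
-- goal that is not connected to the start through non-'X' cells (A's loop drains the queue and
-- falls through, returning None).
def Pre_countLuck (matrix : List String) (k : Int) : Prop :=
  matrix ≠ [] ∧
  (∀ s ∈ matrix, (matrix.headD "").length ≤ s.length) ∧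
  pvStartOf matrix ≠ none ∧
  pvGoalOf matrix ≠ none ∧
  (pvGoalOf matrix).getD (0, 0) ∈
    (pvStepClo matrix)^[matrix.length * (matrix.headD "").length]
      [(pvStartOf matrix).getD (0, 0)]

instance (matrix : List String) (k : Int) : Decidable (Pre_countLuck matrix k) := by
  unfold Pre_countLuck; infer_instance

def pvWitness_countLuck : List String × Int := (["M-*"], 0)

def Spec_countLuck (matrix : List String) (k : Int) (out : String) : Prop := out = countLuck_alt matrix k
instance (matrix : List String) (k : Int) (out : String) : Decidable (Spec_countLuck matrix k out) := by unfold Spec_countLuck; infer_instance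

-- ===== CLAIM (what is proved, stated in full; the proofs are below) =====
def Claim_equal_countLuck : Prop := ∀ (matrix : List String) (k : Int), Dom_countLuck matrix k → Pre_countLuck matrix k → Spec_countLuck matrix k (countLuck matrix k)

-- ===== LEMMAS AND PROOFS =====

-- in-range coordinates
def pvInR (n m : Int) (c : Int × Int) : Prop := 0 ≤ c.1 ∧ c.1 < n ∧ 0 ≤ c.2 ∧ c.2 < m

def pvCellsList (n' m' : Nat) : List (Int × Int) :=
  (List.range n').flatMap (fun i : Nat => (List.range m').map (fun j : Nat => ((i : Int), (j : Int))))

lemma mem_pvCellsList (n' m' : Nat) (c : Int × Int) :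
    c ∈ pvCellsList n' m' ↔ pvInR (n' : Int) (m' : Int) c := by
  obtain ⟨a, b⟩ := c
  rw [pvCellsList, List.mem_flatMap]
  constructor
  · rintro ⟨i, hi, hm⟩
    rw [List.mem_map] at hm
    obtain ⟨j, hj, heq⟩ := hm
    rw [List.mem_range] at hi hj
    injection heq with e1 e2
    exact ⟨by omega, by omega, by omega, by omega⟩
  · rintro ⟨h1, h2, h3, h4⟩
    refine ⟨a.toNat, List.mem_range.mpr (by omega), List.mem_map.mpr
      ⟨b.toNat, List.mem_range.mpr (by omega), ?_⟩⟩
    rw [Prod.mk.injEq]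
    exact ⟨by omega, by omega⟩

lemma getD_mem' {α : Type} {l : List α} {i : Nat} {d : α} (h : i < l.length) :
    l.getD i d ∈ l := by
  rw [List.getD_eq_getElem?_getD, List.getElem?_eq_getElem h]
  exact List.getElem_mem h

lemma length_pvCellsList (n' m' : Nat) : (pvCellsList n' m').length = n' * m' := by
  simp [pvCellsList, List.length_flatMap]

-- the parent-chain predicate: pvChain parent flag start l c f means that following parent
-- pointers from c the ancestors are l (ending at start) and f is the sum of their fork flags
def pvChain (parent : PySem.Dict (Int × Int) (Int × Int)) (flag : PySem.Dict (Int × Int) Int)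
    (start : Int × Int) : List (Int × Int) → (Int × Int) → Int → Prop
  | [], c, f => c = start ∧ f = 0
  | p :: rest, c, f => c ≠ start ∧ parent.get? c = some p ∧
      ∃ f', pvChain parent flag start rest p f' ∧ f = f' + flag.getD p 0

lemma pvChain_parent_insert {parent : PySem.Dict (Int × Int) (Int × Int)}
    {flag : PySem.Dict (Int × Int) Int} {start : Int × Int} {l : List (Int × Int)}
    {c : Int × Int} {f : Int} (h : pvChain parent flag start l c f) (w z : Int × Int)
    (hc : c ≠ w) (hl : ∀ p ∈ l, p ≠ w) :
    pvChain (parent.insert w z) flag start l c f := by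
  induction l generalizing c f with
  | nil => exact h
  | cons p rest ih =>
    obtain ⟨h1, h2, f', h3, h4⟩ := h
    exact ⟨h1, by rw [PySem.Dict.get?_insert_of_ne _ _ hc]; exact h2, f',
      ih h3 (hl p (List.mem_cons_self ..)) (fun q hq => hl q (List.mem_cons_of_mem _ hq)), h4⟩

lemma pvChain_flag_insert {parent : PySem.Dict (Int × Int) (Int × Int)}
    {flag : PySem.Dict (Int × Int) Int} {start : Int × Int} {l : List (Int × Int)}
    {c : Int × Int} {f : Int} (h : pvChain parent flag start l c f) (w : Int × Int) (v : Int)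
    (hl : ∀ p ∈ l, p ≠ w) :
    pvChain parent (flag.insert w v) start l c f := by
  induction l generalizing c f with
  | nil => exact h
  | cons p rest ih =>
    obtain ⟨h1, h2, f', h3, h4⟩ := h
    refine ⟨h1, h2, f', ih h3 (fun q hq => hl q (List.mem_cons_of_mem _ hq)), ?_⟩
    rw [PySem.Dict.getD_insert_of_ne _ _ _ (hl p (List.mem_cons_self ..))]
    exact h4

lemma pvWalkBack_chain {parent : PySem.Dict (Int × Int) (Int × Int)}
    {flag : PySem.Dict (Int × Int) Int} {start : Int × Int} {l : List (Int × Int)}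
    {c : Int × Int} {f : Int} (h : pvChain parent flag start l c f) :
    ∀ (F : Nat) (acc : Int), l.length < F →
      pvWalkBack parent flag start F c acc = acc + f := by
  induction l generalizing c f with
  | nil =>
    intro F acc hF
    obtain ⟨rfl, rfl⟩ := h
    cases F with
    | zero => omega
    | succ F => simp [pvWalkBack]
  | cons p rest ih =>
    intro F acc hF
    obtain ⟨h1, h2, f', h3, h4⟩ := h
    cases F with
    | zero => simp at hF
    | succ F =>
      simp only [pvWalkBack, if_neg h1, h2]
      rw [ih h3 F (acc + flag.getD p 0) (by simpa using Nat.lt_of_succ_lt_succ hF)]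
      omega

-- visited matrix shape and update lemmas
def pvShape (n' m' : Nat) (v : List (List Bool)) : Prop :=
  v.length = n' ∧ ∀ r ∈ v, r.length = m'

lemma pvShape_setV {n' m' : Nat} {v : List (List Bool)} (h : pvShape n' m' v)
    {x y : Int} (hx : 0 ≤ x) (hx2 : x < (n' : Int)) :
    pvShape n' m' (pvSetV v x y) := by
  obtain ⟨h1, h2⟩ := h
  refine ⟨by simp [pvSetV, h1], ?_⟩
  intro r hr
  rcases List.mem_or_eq_of_mem_set hr with hmem | rfl
  · exact h2 r hmem
  · rw [List.length_set]
    apply h2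
    exact getD_mem' (by omega)

lemma getD_replicate' {α : Type} {n : Nat} {a d : α} {i : Nat} :
    (List.replicate n a).getD i d = if i < n then a else d := by
  rw [List.getD_eq_getElem?_getD, List.getElem?_replicate]
  by_cases h : i < n <;> simp [h]

lemma getD_set_eq {α : Type} (l : List α) (i j : Nat) (a d : α) :
    (l.set i a).getD j d = if i = j ∧ i < l.length then a else l.getD j d := by
  by_cases h : i = j ∧ i < l.length
  · obtain ⟨rfl, hlen⟩ := h
    rw [List.getD_eq_getElem?_getD, List.getElem?_set_self hlen]
    simp [hlen]
  · by_cases hij : i = j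
    · subst hij
      have hge : l.length ≤ i := by
        by_contra hcon
        exact h ⟨rfl, by omega⟩
      rw [List.set_eq_of_length_le hge, if_neg h]
    · rw [List.getD_eq_getElem?_getD, List.getElem?_set_ne hij, ← List.getD_eq_getElem?_getD,
        if_neg h]

lemma pvGetV_replicate (n' m' : Nat) (x y : Int) :
    pvGetV (List.replicate n' (List.replicate m' false)) x y = false := by
  unfold pvGetV
  rw [getD_replicate']
  by_cases h : x.toNat < n'
  · rw [if_pos h, getD_replicate']
    by_cases h2 : y.toNat < m' <;> simp [h2]
  · rw [if_neg h]
    simp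

lemma pvGetV_setV {n' m' : Nat} {v : List (List Bool)} (h : pvShape n' m' v)
    {c ct : Int × Int} (hc : pvInR (n' : Int) (m' : Int) c)
    (hct : pvInR (n' : Int) (m' : Int) ct) :
    pvGetV (pvSetV v ct.1 ct.2) c.1 c.2 = if c = ct then true else pvGetV v c.1 c.2 := by
  obtain ⟨hL, hR⟩ := h
  obtain ⟨a, b⟩ := c
  obtain ⟨u, w⟩ := ct
  obtain ⟨h1, h2, h3, h4⟩ := hc
  obtain ⟨g1, g2, g3, g4⟩ := hct
  simp only at h1 h2 h3 h4 g1 g2 g3 g4 ⊢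
  unfold pvGetV pvSetV
  rw [getD_set_eq]
  by_cases hrow : a = u
  · subst hrow
    rw [if_pos ⟨rfl, by omega⟩, getD_set_eq]
    have hrowlen : (v.getD a.toNat []).length = m' := hR _ (getD_mem' (by omega))
    by_cases hcol : b = w
    · subst hcol
      rw [if_pos ⟨rfl, by omega⟩, if_pos rfl]
    · rw [if_neg (by rintro ⟨e, -⟩; omega), if_neg (by simp [Prod.ext_iff, hcol])]
  · rw [if_neg (by rintro ⟨e, -⟩; omega), if_neg (by simp [Prod.ext_iff, hrow])]

-- B's flat cell list is the A-side cell list paired with its characters (rows of full width)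
lemma pvRowB (m' : Nat) (row : List Char) (i : Int) (h : m' ≤ row.length) :
    (PySem.List.enumerate (row.take m') 0).map
        (fun c => (((i, c.1) : Int × Int), c.2))
      = (List.range m').map (fun j : Nat => (((i, (j : Int)) : Int × Int), row.getD j ' ')) := by
  apply List.ext_getElem?
  intro k
  rw [List.getElem?_map, List.getElem?_map, PySem.List.getElem?_enumerate]
  by_cases hk : k < m'
  · rw [List.getElem?_eq_getElem (l := row.take m') (by simp; omega),
      List.getElem?_eq_getElem (l := List.range m') (by simpa)]
    simp [List.getD_eq_getElem?_getD, List.getElem?_eq_getElem (show k < row.length by omega)]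
  · rw [List.getElem?_eq_none (l := row.take m') (by simp; omega),
      List.getElem?_eq_none (l := List.range m') (by simpa using hk)]
    simp

lemma pvCellsB_aux (m' : Nat) :
    ∀ (rows : List String) (i0 : Nat), (∀ s ∈ rows, m' ≤ s.length) →
      (PySem.List.enumerate rows (i0 : Int)).flatMap (fun r =>
        (PySem.List.enumerate (r.2.toList.take m') 0).map (fun c => ((r.1, c.1), c.2)))
      = (List.range rows.length).flatMap (fun i : Nat => (List.range m').map (fun j : Nat =>
          (((((i0 + i : Nat) : Int), (j : Int)) : Int × Int),
            (rows.getD i "").toList.getD j ' '))) := by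
  intro rows
  induction rows with
  | nil => intro i0 _; simp [PySem.List.enumerate_nil]
  | cons r rest ih =>
    intro i0 hrows
    rw [PySem.List.enumerate_cons, List.flatMap_cons]
    have hr : m' ≤ r.toList.length := by
      have := hrows r (List.mem_cons_self ..)
      simpa using this
    have hcast : ((i0 : Int) + 1) = (((i0 + 1 : Nat) : Int)) := by push_cast; ring
    rw [pvRowB m' r.toList (i0 : Int) hr, hcast,
      ih (i0 + 1) (fun s hs => hrows s (List.mem_cons_of_mem _ hs)),
      List.length_cons, List.range_succ_eq_map, List.flatMap_cons, List.flatMap_map]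
    congr 1
    refine List.flatMap_congr (fun a _ => List.map_congr_left (fun j _ => ?_))
    simp only [List.getD_cons_succ, Prod.mk.injEq, and_true]
    omega

lemma pvCellsB_eq (matrix : List String)
    (hrows : ∀ s ∈ matrix, (matrix.headD "").length ≤ s.length) :
    pvCellsB matrix (matrix.headD "").length
      = (pvCellsList matrix.length (matrix.headD "").length).map
          (fun c => (c, pvCellD matrix c.1 c.2)) := by
  have h0 := pvCellsB_aux (matrix.headD "").length matrix 0 hrows
  rw [Nat.cast_zero] at h0
  simp only [Nat.zero_add] at h0
  rw [pvCellsB, h0, pvCellsList, List.map_flatMap]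
  apply List.flatMap_congr
  intro i _
  rw [List.map_map]
  apply List.map_congr_left
  intro j _
  simp only [Function.comp, pvCellD, Int.toNat_natCast]

-- membership in B's free set = in range and not a wall
lemma contains_pvFreeB (matrix : List String) (c : Int × Int) :
    PySem.Set.contains
        (pvFreeB ((pvCellsList matrix.length (matrix.headD "").length).map
          (fun c => (c, pvCellD matrix c.1 c.2)))) c = true
      ↔ pvInR (matrix.length : Int) ((matrix.headD "").length : Int) c ∧
          pvCellD matrix c.1 c.2 ≠ 'X' := by
  rw [PySem.Set.contains_iff, pvFreeB, PySem.Set.mem_ofList, List.mem_filterMap]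
  constructor
  · rintro ⟨p, hp, he⟩
    rw [List.mem_map] at hp
    obtain ⟨d, hd, rfl⟩ := hp
    by_cases hx : pvCellD matrix d.1 d.2 ≠ 'X'
    · rw [if_pos hx] at he
      injection he with he
      subst he
      exact ⟨(mem_pvCellsList _ _ _).mp hd, hx⟩
    · rw [if_neg hx] at he
      cases he
  · rintro ⟨hin, hx⟩
    exact ⟨(c, pvCellD matrix c.1 c.2),
      List.mem_map.mpr ⟨c, (mem_pvCellsList _ _ _).mpr hin, rfl⟩, by rw [if_pos hx]⟩

-- A's neighbour fold equals B's candidate-filter under the visited/seen correspondence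
lemma pvNbrs_core (matrix : List String) (n m : Int) (vA : List (List Bool))
    (free seen : PySem.Set (Int × Int)) (x y : Int)
    (hfree : ∀ c : Int × Int, PySem.Set.contains free c = true ↔
      pvInR n m c ∧ pvCellD matrix c.1 c.2 ≠ 'X')
    (hseen : ∀ c : Int × Int, pvInR n m c → (pvGetV vA c.1 c.2 = true ↔ c ∈ seen)) :
    ∀ (l : List (Int × Int)) (acc : List (Int × Int)),
      l.foldl (fun acc d =>
        if 0 ≤ x + d.1 ∧ x + d.1 < n ∧ 0 ≤ y + d.2 ∧ y + d.2 < m then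
          if pvGetV vA (x + d.1) (y + d.2) = false ∧ pvCellD matrix (x + d.1) (y + d.2) ≠ 'X'
          then acc ++ [(x + d.1, y + d.2)] else acc
        else acc) acc
      = acc ++ (l.map (fun d => (x + d.1, y + d.2))).filter
          (fun nb => PySem.Set.contains free nb && !PySem.Set.contains seen nb) := by
  intro l
  induction l with
  | nil => simp
  | cons d rest ih =>
    intro acc
    simp only [List.foldl_cons, List.map_cons, List.filter_cons]
    set nb : Int × Int := (x + d.1, y + d.2) with hnb
    by_cases h1 : 0 ≤ x + d.1 ∧ x + d.1 < n ∧ 0 ≤ y + d.2 ∧ y + d.2 < m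
    · have hin : pvInR n m nb := ⟨h1.1, h1.2.1, h1.2.2.1, h1.2.2.2⟩
      by_cases h2 : pvGetV vA (x + d.1) (y + d.2) = false ∧
          pvCellD matrix (x + d.1) (y + d.2) ≠ 'X'
      · have hcf : PySem.Set.contains free nb = true := (hfree nb).mpr ⟨hin, h2.2⟩
        have hcs : PySem.Set.contains seen nb = false := by
          cases hc : PySem.Set.contains seen nb
          · rfl
          · have := (hseen nb hin).mpr ((PySem.Set.contains_iff _ _).mp hc)
            rw [h2.1] at this
            cases this
        have hcond : (PySem.Set.contains free nb && !PySem.Set.contains seen nb) = true := by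
          rw [hcf, hcs]
          rfl
        rw [if_pos h1, if_pos h2, ih, hcond]
        simp
      · have hcond : (PySem.Set.contains free nb && !PySem.Set.contains seen nb) = false := by
          by_cases hx : pvCellD matrix nb.1 nb.2 ≠ 'X'
          · have hv : pvGetV vA nb.1 nb.2 = true := by
              cases hg : pvGetV vA nb.1 nb.2
              · exact absurd ⟨hg, hx⟩ h2
              · rfl
            have hs : PySem.Set.contains seen nb = true :=
              (PySem.Set.contains_iff _ _).mpr ((hseen nb hin).mp hv)
            rw [hs]
            simp
          · have hf : PySem.Set.contains free nb = false := by
              cases hc : PySem.Set.contains free nb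
              · rfl
              · exact absurd ((hfree nb).mp hc).2 (by simpa using hx)
            rw [hf]
            rfl
        rw [if_pos h1, if_neg h2, ih, hcond]
        simp
    · have hf : PySem.Set.contains free nb = false := by
        cases hc : PySem.Set.contains free nb
        · rfl
        · exact absurd ((hfree nb).mp hc).1 (fun hp => h1 ⟨hp.1, hp.2.1, hp.2.2.1, hp.2.2.2⟩)
      have hcond : (PySem.Set.contains free nb && !PySem.Set.contains seen nb) = false := by
        rw [hf]
        rfl
      rw [if_neg h1, ih, hcond]
      simp

lemma pvStepB_cands (x y : Int) :
    pvDirs.map (fun d => (x + d.1, y + d.2)) = [(x + 1, y), (x - 1, y), (x, y + 1), (x, y - 1)] := by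
  simp [pvDirs, Prod.ext_iff]
  omega

lemma pvNbrsA_eq (matrix : List String) (n m : Int) (vA : List (List Bool))
    (free seen : PySem.Set (Int × Int)) (x y : Int)
    (hfree : ∀ c : Int × Int, PySem.Set.contains free c = true ↔
      pvInR n m c ∧ pvCellD matrix c.1 c.2 ≠ 'X')
    (hseen : ∀ c : Int × Int, pvInR n m c → (pvGetV vA c.1 c.2 = true ↔ c ∈ seen)) :
    pvNbrsA matrix n m vA x y = pvStepB free seen x y := by
  have := pvNbrs_core matrix n m vA free seen x y hfree hseen pvDirs []
  rw [pvStepB, ← pvStepB_cands x y]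
  simpa [pvNbrsA] using this

lemma pvStepB_mem {matrix : List String} {n m : Int} {free seen : PySem.Set (Int × Int)}
    {x y : Int} {c : Int × Int}
    (hfree : ∀ c : Int × Int, PySem.Set.contains free c = true ↔
      pvInR n m c ∧ pvCellD matrix c.1 c.2 ≠ 'X')
    (h : c ∈ pvStepB free seen x y) : pvInR n m c ∧ c ∉ seen := by
  rw [pvStepB, List.mem_filter] at h
  obtain ⟨-, hcond⟩ := h
  rw [Bool.and_eq_true, Bool.not_eq_true'] at hcond
  refine ⟨((hfree c).mp hcond.1).1, fun hm => ?_⟩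
  have := (PySem.Set.contains_iff seen c).mpr hm
  rw [hcond.2] at this
  cases this

lemma pvStepB_nodup (free seen : PySem.Set (Int × Int)) (x y : Int) :
    (pvStepB free seen x y).Nodup := by
  apply List.Nodup.filter
  simp [List.nodup_cons, Prod.ext_iff]
  omega

-- the loop invariant tying A's state (qA, vA) to B's state (seen, parent, flag)
structure PVInv (matrix : List String) (n' m' : Nat) (start : Int × Int)
    (qA : List (Int × Int × Int)) (vA : List (List Bool)) (seen : PySem.Set (Int × Int))
    (parent : PySem.Dict (Int × Int) (Int × Int)) (flag : PySem.Dict (Int × Int) Int) :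
    Prop where
  shape : pvShape n' m' vA
  vcorr : ∀ c : Int × Int, pvInR (n' : Int) (m' : Int) c →
    (pvGetV vA c.1 c.2 = true ↔ c ∈ seen)
  seenNodup : seen.Nodup
  seenInR : ∀ c ∈ seen, pvInR (n' : Int) (m' : Int) c
  startSeen : start ∈ seen
  qMem : ∀ t ∈ qA, (t.1, t.2.1) ∈ seen
  qNodup : (qA.map (fun t : Int × Int × Int => (t.1, t.2.1))).Nodup
  qFlag : ∀ t ∈ qA, flag.contains (t.1, t.2.1) = false
  flagSeen : ∀ c : Int × Int, flag.contains c = true → c ∈ seen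
  chain : ∀ t ∈ qA, ∃ l, pvChain parent flag start l (t.1, t.2.1) t.2.2 ∧
      (∀ p ∈ l, p ∈ seen) ∧ (∀ p ∈ l, flag.contains p = true) ∧ ((t.1, t.2.1) :: l).Nodup

-- one pop's children-processing fold, in lockstep
def pvRel (matrix : List String) (n' m' : Nat) (start : Int × Int)
    (flag : PySem.Dict (Int × Int) Int)
    (stA : List (Int × Int × Int) × List (List Bool))
    (stB : List (Int × Int) × PySem.Set (Int × Int) × PySem.Dict (Int × Int) (Int × Int)) :
    Prop :=
  stB.1 = stA.1.map (fun t => (t.1, t.2.1)) ∧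
  PVInv matrix n' m' start stA.1 stA.2 stB.2.1 stB.2.2 flag

lemma pvFoldStep (matrix : List String) (n' m' : Nat) (start cur : Int × Int) (fF : Int)
    (flag : PySem.Dict (Int × Int) Int) :
    ∀ (nbrs : List (Int × Int)) (qA : List (Int × Int × Int)) (vA : List (List Bool))
      (seen : PySem.Set (Int × Int)) (parent : PySem.Dict (Int × Int) (Int × Int)),
      PVInv matrix n' m' start qA vA seen parent flag →
      nbrs.Nodup →
      (∀ c ∈ nbrs, pvInR (n' : Int) (m' : Int) c ∧ c ∉ seen) →
      cur ∈ seen →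
      flag.contains cur = true →
      (∃ l f', pvChain parent flag start l cur f' ∧ fF = f' + flag.getD cur 0 ∧
        (∀ p ∈ l, p ∈ seen) ∧ (∀ p ∈ l, flag.contains p = true) ∧ (cur :: l).Nodup) →
      pvRel matrix n' m' start flag
        (nbrs.foldl (fun (st : List (Int × Int × Int) × List (List Bool)) c =>
          (st.1 ++ [(c.1, c.2, fF)], pvSetV st.2 c.1 c.2)) (qA, vA))
        (nbrs.foldl (fun (st : List (Int × Int) × PySem.Set (Int × Int) ×
              PySem.Dict (Int × Int) (Int × Int)) nb =>
            (st.1 ++ [nb], PySem.Set.add st.2.1 nb, st.2.2.insert nb cur))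
          (qA.map (fun t => (t.1, t.2.1)), seen, parent)) := by
  intro nbrs
  induction nbrs with
  | nil =>
    intro qA vA seen parent inv _ _ _ _ _
    exact ⟨rfl, inv⟩
  | cons c rest ih =>
    intro qA vA seen parent inv hnd hfresh hcur hcurflag hch
    have hcInR : pvInR (n' : Int) (m' : Int) c := (hfresh c (List.mem_cons_self ..)).1
    have hcNvis : c ∉ seen := (hfresh c (List.mem_cons_self ..)).2
    obtain ⟨l, f', hchain, hfF, hlv, hlf, hnd2⟩ := hch
    obtain ⟨hcrest, hndrest⟩ := List.nodup_cons.mp hnd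
    simp only [List.foldl_cons]
    have hqmap : (qA.map (fun t : Int × Int × Int => (t.1, t.2.1))) ++ [c]
        = (qA ++ [(c.1, c.2, fF)]).map (fun t => (t.1, t.2.1)) := by
      simp
    rw [hqmap]
    have hneC : ∀ p ∈ seen, p ≠ c := fun p hp he => hcNvis (he ▸ hp)
    have inv' : PVInv matrix n' m' start (qA ++ [(c.1, c.2, fF)]) (pvSetV vA c.1 c.2)
        (PySem.Set.add seen c) (parent.insert c cur) flag := by
      constructor
      · exact pvShape_setV inv.shape hcInR.1 hcInR.2.1
      · intro c' hc'
        rw [pvGetV_setV inv.shape hc' hcInR, PySem.Set.mem_add]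
        by_cases he : c' = c
        · simp [he]
        · rw [if_neg he, inv.vcorr c' hc']
          constructor
          · exact fun h => Or.inl h
          · rintro (h | h)
            · exact h
            · exact absurd h he
      · exact PySem.Set.nodup_add _ _ inv.seenNodup
      · intro d hd
        rcases (PySem.Set.mem_add _ _ _).mp hd with h | rfl
        · exact inv.seenInR d h
        · exact hcInR
      · exact (PySem.Set.mem_add _ _ _).mpr (Or.inl inv.startSeen)
      · intro t ht
        rcases List.mem_append.mp ht with h | h
        · exact (PySem.Set.mem_add _ _ _).mpr (Or.inl (inv.qMem t h))
        · rcases List.mem_singleton.mp h with rfl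
          exact (PySem.Set.mem_add _ _ _).mpr (Or.inr rfl)
      · rw [← hqmap]
        rw [List.nodup_append]
        refine ⟨inv.qNodup, by simp, ?_⟩
        intro p hp
        simp only [List.mem_map] at hp
        obtain ⟨t, htq, rfl⟩ := hp
        intro hin hinm
        rw [List.mem_singleton] at hinm
        subst hinm
        exact fun he => hcNvis (he ▸ inv.qMem t htq)
      · intro t ht
        rcases List.mem_append.mp ht with h | h
        · exact inv.qFlag t h
        · rcases List.mem_singleton.mp h with rfl
          cases hcon : flag.contains ((c.1, c.2, fF).1, (c.1, c.2, fF).2.1) with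
          | false => rfl
          | true => exact absurd (inv.flagSeen _ hcon) hcNvis
      · intro d hd
        exact (PySem.Set.mem_add _ _ _).mpr (Or.inl (inv.flagSeen d hd))
      · intro t ht
        rcases List.mem_append.mp ht with h | h
        · obtain ⟨l0, hch0, hlv0, hlf0, hnd0⟩ := inv.chain t h
          refine ⟨l0, pvChain_parent_insert hch0 c cur
            (fun he => hcNvis (he ▸ inv.qMem t h)) (fun p hp he => hcNvis (he ▸ hlv0 p hp)),
            fun p hp => (PySem.Set.mem_add _ _ _).mpr (Or.inl (hlv0 p hp)), hlf0, hnd0⟩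
        · rcases List.mem_singleton.mp h with rfl
          refine ⟨cur :: l, ?_, ?_, ?_, ?_⟩
          · refine ⟨fun he => hcNvis (by rw [show c = start from he]; exact inv.startSeen),
              ?_, f', ?_, hfF⟩
            · exact PySem.Dict.get?_insert_self _ _ _
            · exact pvChain_parent_insert hchain c cur (hneC cur hcur)
                (fun p hp => hneC p (hlv p hp))
          · intro p hp
            rcases List.mem_cons.mp hp with rfl | hp
            · exact (PySem.Set.mem_add _ _ _).mpr (Or.inl hcur)
            · exact (PySem.Set.mem_add _ _ _).mpr (Or.inl (hlv p hp))
          · intro p hp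
            rcases List.mem_cons.mp hp with rfl | hp
            · exact hcurflag
            · exact hlf p hp
          · rw [List.nodup_cons]
            refine ⟨?_, hnd2⟩
            intro hmem
            rcases List.mem_cons.mp hmem with he | hmem
            · exact hcNvis (by rw [show c = cur from he]; exact hcur)
            · exact hcNvis (hlv _ hmem)
    exact ih (qA ++ [(c.1, c.2, fF)]) (pvSetV vA c.1 c.2) (PySem.Set.add seen c)
      (parent.insert c cur) inv' hndrest
      (fun d hd => ⟨(hfresh d (List.mem_cons_of_mem _ hd)).1, fun hdm => by
        rcases (PySem.Set.mem_add _ _ _).mp hdm with h | rfl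
        · exact (hfresh d (List.mem_cons_of_mem _ hd)).2 h
        · exact hcrest hd⟩)
      ((PySem.Set.mem_add _ _ _).mpr (Or.inl hcur)) hcurflag
      ⟨l, f', pvChain_parent_insert hchain c cur (hneC cur hcur)
          (fun p hp => hneC p (hlv p hp)), hfF,
        fun p hp => (PySem.Set.mem_add _ _ _).mpr (Or.inl (hlv p hp)), hlf, hnd2⟩

-- the main lockstep lemma
lemma pvLock (matrix : List String) (k : Int) (n' m' : Nat) (start goal : Int × Int)
    (free : PySem.Set (Int × Int))
    (hfree : ∀ c : Int × Int, PySem.Set.contains free c = true ↔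
      pvInR (n' : Int) (m' : Int) c ∧ pvCellD matrix c.1 c.2 ≠ 'X') :
    ∀ (fuel : Nat) (qA : List (Int × Int × Int)) (vA : List (List Bool))
      (seen : PySem.Set (Int × Int)) (parent : PySem.Dict (Int × Int) (Int × Int))
      (flag : PySem.Dict (Int × Int) Int),
      PVInv matrix n' m' start qA vA seen parent flag →
      pvLoopA matrix k (n' : Int) (m' : Int) goal fuel qA vA =
        pvLoopB goal start k free (n' * m' + 1) fuel
          (qA.map (fun t => (t.1, t.2.1))) seen parent flag := by
  intro fuel
  induction fuel with
  | zero =>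
    intro qA vA seen parent flag _
    rfl
  | succ fuel ih =>
    intro qA vA seen parent flag inv
    cases qA with
    | nil => rfl
    | cons t rest =>
      obtain ⟨x, y, f⟩ := t
      simp only [List.map_cons]
      by_cases hg : (x, y) = goal
      · -- the goal is popped: A answers from the carried counter, B from the back-walk
        obtain ⟨l, hchain, hlv, hlf, hnd2⟩ := inv.chain (x, y, f) (List.mem_cons_self ..)
        have hlen : l.length < n' * m' + 1 := by
          have hsub : l ⊆ pvCellsList n' m' := fun p hp =>
            (mem_pvCellsList n' m' p).mpr (inv.seenInR p (hlv p hp))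
          have hndl : l.Nodup := (List.nodup_cons.mp hnd2).2
          have hle := (hndl.subperm hsub).length_le
          rw [length_pvCellsList] at hle
          omega
        have hbw := pvWalkBack_chain hchain (n' * m' + 1) 0 hlen
        simp only [pvLoopA, pvLoopB, if_pos hg]
        rw [← hg, hbw]
        simp
      · -- an interior pop: both sides process the same neighbour list in lockstep
        simp only [pvLoopA, pvLoopB, if_neg hg]
        have hnbr : pvNbrsA matrix (n' : Int) (m' : Int) vA x y
            = pvStepB free seen x y :=
          pvNbrsA_eq matrix _ _ vA free seen x y hfree (fun c hc => inv.vcorr c hc)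
        rw [hnbr]
        set nbrs := pvStepB free seen x y with hnbrs
        set fF : Int := if 1 < nbrs.length then f + 1 else f with hfF
        set flag' := flag.insert (x, y) (if 1 < nbrs.length then (1 : Int) else 0) with hflag'
        have hheadflag : flag.contains (x, y) = false :=
          inv.qFlag (x, y, f) (List.mem_cons_self ..)
        have hheadvis : (x, y) ∈ seen := inv.qMem (x, y, f) (List.mem_cons_self ..)
        have hqtail : ((x, y) ∉ rest.map (fun t : Int × Int × Int => (t.1, t.2.1))) ∧
            (rest.map (fun t : Int × Int × Int => (t.1, t.2.1))).Nodup := by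
          have := inv.qNodup
          rw [List.map_cons, List.nodup_cons] at this
          exact this
        have hflagne : ∀ p : Int × Int, flag.contains p = true → p ≠ (x, y) := by
          intro p hp he
          rw [he, hheadflag] at hp
          cases hp
        have inv2 : PVInv matrix n' m' start rest vA seen parent flag' := by
          constructor
          · exact inv.shape
          · exact inv.vcorr
          · exact inv.seenNodup
          · exact inv.seenInR
          · exact inv.startSeen
          · exact fun t ht => inv.qMem t (List.mem_cons_of_mem _ ht)
          · exact hqtail.2
          · intro t ht
            rw [hflag', PySem.Dict.contains_insert]
            have h1 : flag.contains (t.1, t.2.1) = false :=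
              inv.qFlag t (List.mem_cons_of_mem _ ht)
            have h2 : (t.1, t.2.1) ≠ (x, y) := by
              intro he
              exact hqtail.1 (he ▸ List.mem_map_of_mem ht)
            simp [h1, h2]
          · intro d hd
            rw [hflag', PySem.Dict.contains_insert] at hd
            rcases Bool.or_eq_true_iff.mp hd with h | h
            · exact (beq_iff_eq.mp h) ▸ hheadvis
            · exact inv.flagSeen d h
          · intro t ht
            obtain ⟨l0, hch0, hlv0, hlf0, hnd0⟩ := inv.chain t (List.mem_cons_of_mem _ ht)
            refine ⟨l0, pvChain_flag_insert hch0 (x, y) _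
              (fun p hp => hflagne p (hlf0 p hp)), hlv0, ?_, hnd0⟩
            intro p hp
            rw [hflag', PySem.Dict.contains_insert]
            simp [hlf0 p hp]
        have hch' : ∃ l1 f1, pvChain parent flag' start l1 (x, y) f1 ∧
            fF = f1 + flag'.getD (x, y) 0 ∧ (∀ p ∈ l1, p ∈ seen) ∧
            (∀ p ∈ l1, flag'.contains p = true) ∧ ((x, y) :: l1).Nodup := by
          obtain ⟨l0, hch0, hlv0, hlf0, hnd0⟩ := inv.chain (x, y, f) (List.mem_cons_self ..)
          refine ⟨l0, f, pvChain_flag_insert hch0 (x, y) _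
            (fun p hp => hflagne p (hlf0 p hp)), ?_, hlv0, ?_, hnd0⟩
          · rw [hflag', PySem.Dict.getD_insert_self, hfF]
            by_cases hlen : 1 < nbrs.length <;> simp [hlen]
          · intro p hp
            rw [hflag', PySem.Dict.contains_insert]
            simp [hlf0 p hp]
        have hrel := pvFoldStep matrix n' m' start (x, y) fF flag' nbrs rest vA seen parent
          inv2 (by rw [hnbrs]; exact pvStepB_nodup free seen x y)
          (by intro d hd; rw [hnbrs] at hd; exact pvStepB_mem hfree hd)
          hheadvis (by rw [hflag']; exact PySem.Dict.contains_insert_self _ _ _) hch'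
        obtain ⟨hq, inv3⟩ := hrel
        rw [hq]
        exact ih _ _ _ _ _ inv3

-- the scanning loop: last occurrence = first match of the reversed cell list
lemma foldl_prod_split {α σ τ : Type} (f : σ → α → σ) (g : τ → α → τ) :
    ∀ (l : List α) (s : σ) (t : τ),
      l.foldl (fun p a => (f p.1 a, g p.2 a)) (s, t) = (l.foldl f s, l.foldl g t) := by
  intro l
  induction l with
  | nil => intro s t; rfl
  | cons a rest ih => intro s t; simp only [List.foldl_cons]; exact ih _ _

lemma foldl_last_upd {α : Type} (P : α → Prop) [DecidablePred P] :
    ∀ (l : List α) (init : Option α),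
      l.foldl (fun acc a => if P a then some a else acc) init
        = (l.reverse.find? (fun a => decide (P a))).or init := by
  intro l
  induction l with
  | nil => intro init; simp
  | cons a t ih =>
    intro init
    simp only [List.foldl_cons, List.reverse_cons, List.find?_append, ih]
    cases h : t.reverse.find? (fun a => decide (P a)) with
    | some b => simp [Option.or]
    | none =>
      by_cases hP : P a <;> simp [Option.or, List.find?, hP]

lemma foldl_flatMap' {α β σ : Type} (g : α → List β) (f : σ → β → σ) :
    ∀ (l : List α) (s : σ),
      (l.flatMap g).foldl f s = l.foldl (fun s a => (g a).foldl f s) s := by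
  intro l
  induction l with
  | nil => intro s; rfl
  | cons a rest ih => intro s; simp only [List.flatMap_cons, List.foldl_append, List.foldl_cons, ih]

lemma pvScanA_eq (matrix : List String) (n' m' : Nat) :
    pvScanA matrix n' m' =
      ((pvCellsList n' m').reverse.find? (fun c => pvCellD matrix c.1 c.2 = 'M'),
       (pvCellsList n' m').reverse.find? (fun c => pvCellD matrix c.1 c.2 = '*')) := by
  have h1 : pvScanA matrix n' m' = (pvCellsList n' m').foldl
      (fun acc (c : Int × Int) =>
        let ch := pvCellD matrix c.1 c.2
        let acc1 := if ch = 'M' then (some c, acc.2) else acc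
        if ch = '*' then (acc1.1, some c) else acc1) (none, none) := by
    rw [pvCellsList, foldl_flatMap']
    simp only [List.foldl_map]
    unfold pvScanA
    rfl
  have h2 : (fun (acc : Option (Int × Int) × Option (Int × Int)) (c : Int × Int) =>
        let ch := pvCellD matrix c.1 c.2
        let acc1 := if ch = 'M' then (some c, acc.2) else acc
        if ch = '*' then (acc1.1, some c) else acc1)
      = (fun (p : Option (Int × Int) × Option (Int × Int)) (c : Int × Int) =>
        ((fun (s : Option (Int × Int)) (c : Int × Int) =>
            if pvCellD matrix c.1 c.2 = 'M' then some c else s) p.1 c,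
         (fun (s : Option (Int × Int)) (c : Int × Int) =>
            if pvCellD matrix c.1 c.2 = '*' then some c else s) p.2 c)) := by
    funext p c
    by_cases hM : pvCellD matrix c.1 c.2 = 'M' <;>
      by_cases hS : pvCellD matrix c.1 c.2 = '*' <;> simp [hM, hS]
  rw [h1, h2, foldl_prod_split (fun (s : Option (Int × Int)) (c : Int × Int) =>
      if pvCellD matrix c.1 c.2 = 'M' then some c else s)
    (fun (s : Option (Int × Int)) (c : Int × Int) =>
      if pvCellD matrix c.1 c.2 = '*' then some c else s),
    foldl_last_upd, foldl_last_upd, Option.or_none, Option.or_none]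

lemma pvFind_inR {n' m' : Nat} {P : (Int × Int) → Bool} {c : Int × Int}
    (h : (pvCellsList n' m').reverse.find? P = some c) : pvInR (n' : Int) (m' : Int) c := by
  have := List.mem_of_find?_eq_some h
  rw [List.mem_reverse] at this
  exact (mem_pvCellsList n' m' c).mp this

-- B's reversed first-match over the paired cell list is A's last-wins scan result
lemma pvFindB_eq (matrix : List String) (ch : Char)
    (hrows : ∀ s ∈ matrix, (matrix.headD "").length ≤ s.length) :
    (pvCellsB matrix (matrix.headD "").length).reverse.find? (fun p => p.2 = ch)
      = ((pvCellsList matrix.length (matrix.headD "").length).reverse.find?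
          (fun c => pvCellD matrix c.1 c.2 = ch)).map
            (fun c => (c, pvCellD matrix c.1 c.2)) := by
  rw [pvCellsB_eq matrix hrows, ← List.map_reverse, List.find?_map]
  rfl

theorem countLuck_agree (matrix : List String) (k : Int)
    (hrows : ∀ s ∈ matrix, (matrix.headD "").length ≤ s.length) :
    countLuck matrix k = countLuck_alt matrix k := by
  simp only [countLuck, countLuck_alt]
  rw [pvScanA_eq, pvFindB_eq matrix 'M' hrows, pvFindB_eq matrix '*' hrows,
    pvCellsB_eq matrix hrows]
  cases hS : (pvCellsList matrix.length (matrix.headD "").length).reverse.find?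
      (fun c => pvCellD matrix c.1 c.2 = 'M') with
  | none =>
    cases hG : (pvCellsList matrix.length (matrix.headD "").length).reverse.find?
        (fun c => pvCellD matrix c.1 c.2 = '*') <;> rfl
  | some s =>
    cases hG : (pvCellsList matrix.length (matrix.headD "").length).reverse.find?
        (fun c => pvCellD matrix c.1 c.2 = '*') with
    | none => rfl
    | some g =>
      simp only [Option.map_some]
      have hsIn : pvInR (matrix.length : Int) ((matrix.headD "").length : Int) s :=
        pvFind_inR hS
      have hshape0 : pvShape matrix.length (matrix.headD "").length
          (List.replicate matrix.length (List.replicate (matrix.headD "").length false)) := by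
        refine ⟨List.length_replicate, ?_⟩
        intro r hr
        rw [List.eq_of_mem_replicate hr]
        exact List.length_replicate
      have hof : PySem.Set.ofList [s] = [s] :=
        PySem.Set.ofList_eq_self_of_nodup _ (by simp)
      have inv0 : PVInv matrix matrix.length (matrix.headD "").length s
          [(s.1, s.2, 0)]
          (pvSetV (List.replicate matrix.length
            (List.replicate (matrix.headD "").length false)) s.1 s.2)
          (PySem.Set.ofList [s]) PySem.Dict.empty PySem.Dict.empty := by
        rw [hof]
        constructor
        · exact pvShape_setV hshape0 hsIn.1 hsIn.2.1
        · intro c hc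
          rw [pvGetV_setV hshape0 hc hsIn, List.mem_singleton]
          by_cases he : c = s
          · simp [he]
          · rw [if_neg he, pvGetV_replicate]
            simp [he]
        · simp
        · intro c hcm
          rw [List.mem_singleton] at hcm
          exact hcm ▸ hsIn
        · exact List.mem_singleton.mpr rfl
        · intro t ht
          rcases List.mem_singleton.mp ht with rfl
          exact List.mem_singleton.mpr rfl
        · simp
        · intro t ht
          exact PySem.Dict.contains_empty _
        · intro d hd
          rw [PySem.Dict.contains_empty] at hd
          cases hd
        · intro t ht
          rcases List.mem_singleton.mp ht with rfl
          exact ⟨[], ⟨rfl, rfl⟩, by simp, by simp, by simp⟩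
      have := pvLock matrix k matrix.length (matrix.headD "").length s g
        (pvFreeB ((pvCellsList matrix.length (matrix.headD "").length).map
          (fun c => (c, pvCellD matrix c.1 c.2))))
        (contains_pvFreeB matrix)
        (matrix.length * (matrix.headD "").length + 1) [(s.1, s.2, 0)] _ _ _ _ inv0
      simpa using this

-- ===== VERDICT (by name: the statement is the Claim_ definition above) =====
theorem countLuck_spec : Claim_equal_countLuck := by
  intro matrix k _ hpre
  unfold Spec_countLuck
  exact countLuck_agree matrix k hpre.2.1
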